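-- pv_equiv track=rewrite | github.com/GavinButts/SeniorThesis | Tableau.py | is_sit
-- ===== SOURCE A (Python) =====
-- def is_sit(tableau):
--     """Check if the tableau is a Standard Immaculate Tableau (SIT)."""
--     # Check rows are strictly increasing (left-to-right)
--     for row in tableau:
--         if sorted(row) != row:
--             return False
--
--     # Check the leftmost column is strictly increasing (bottom-to-top)
--     leftmost_col = [row[0] for row in tableau if len(row) > 0]  # Extract leftmost column
--     if sorted(leftmost_col) != leftmost_col or len(set(leftmost_col)) != len(leftmost_col):
--         return False
--
--     return True
-- ===== SOURCE B (Python) =====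
-- def is_sit(tableau):
--     """Check if the tableau is a Standard Immaculate Tableau (SIT)."""
--     prev = None
--     for row in tableau:
--         # row must be non-decreasing: adjacent-pair scan
--         for a, b in zip(row, row[1:]):
--             if a > b:
--                 return False
--         if row:
--             # leftmost column must be strictly increasing
--             if prev is not None and row[0] <= prev:
--                 return False
--             prev = row[0]
--     return True
-- ===== Notes on version B (the rewrite author's own statement) =====
-- stated objective: alternative
-- what changed: Replaced A's per-row sorts plus a sorted/deduplicated copy of the leftmost column by one linear pass that compares adjacent elements in each row and threads the previous leftmost value for strictness.
import Mathlib
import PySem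

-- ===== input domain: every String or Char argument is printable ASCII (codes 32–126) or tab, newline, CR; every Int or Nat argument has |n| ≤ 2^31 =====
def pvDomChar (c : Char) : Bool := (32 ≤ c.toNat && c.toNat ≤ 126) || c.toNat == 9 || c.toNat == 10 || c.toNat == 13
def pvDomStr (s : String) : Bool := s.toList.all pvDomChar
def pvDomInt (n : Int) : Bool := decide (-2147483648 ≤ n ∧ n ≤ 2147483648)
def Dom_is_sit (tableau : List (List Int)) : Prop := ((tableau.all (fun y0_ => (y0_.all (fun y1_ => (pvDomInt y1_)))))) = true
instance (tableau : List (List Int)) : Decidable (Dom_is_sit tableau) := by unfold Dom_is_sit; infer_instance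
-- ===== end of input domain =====

-- B replaces per-row sorts and a sorted/deduplicated column copy by one linear
-- adjacent-pair pass threading the previous leftmost value (objective: alternative).

-- ===== PORT A =====
-- the 'for row in tableau: if sorted(row) != row: return False' loop
def pvRowsOk : List (List Int) → Bool
  | [] => true
  | r :: rest => if PySem.List.sorted r (fun x => x) ≠ r then false else pvRowsOk rest

def is_sit (tableau : List (List Int)) : Bool :=
  if pvRowsOk tableau = false then false
  else
    -- [row[0] for row in tableau if len(row) > 0]  (row[0] under the guard = head?)
    let leftmost_col : List Int := tableau.filterMap List.head?
    if PySem.List.sorted leftmost_col (fun x => x) ≠ leftmost_col ∨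
       (PySem.Set.ofList leftmost_col).length ≠ leftmost_col.length then false
    else true

-- ===== PORT B =====
-- inner 'for a, b in zip(row, row[1:])' adjacent-pair scan
def pvAdjLe : List Int → Bool
  | a :: b :: t => a ≤ b && pvAdjLe (b :: t)
  | _ => true

-- the single pass over tableau, threading prev
def pvScan : Option Int → List (List Int) → Bool
  | _, [] => true
  | prev, row :: rest =>
    if !pvAdjLe row then false
    else
      match row with
      | [] => pvScan prev rest
      | x :: _ =>
        match prev with
        | some p => if x ≤ p then false else pvScan (some x) rest
        | none => pvScan (some x) rest

def is_sit_alt (tableau : List (List Int)) : Bool := pvScan none tableau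

-- ===== PRECONDITION & SPEC =====
def Spec_is_sit (tableau : List (List Int)) (out : Bool) : Prop := out = is_sit_alt tableau
instance (tableau : List (List Int)) (out : Bool) : Decidable (Spec_is_sit tableau out) := by unfold Spec_is_sit; infer_instance

-- ===== CLAIM (what is proved, stated in full; the proofs are below) =====
def Claim_equal_is_sit : Prop := ∀ (tableau : List (List Int)), Dom_is_sit tableau → Spec_is_sit tableau (is_sit tableau)

-- ===== LEMMAS AND PROOFS =====

-- the strict-scan of the leftmost column alone
def pvColScan : Option Int → List Int → Bool
  | _, [] => true
  | none, x :: xs => pvColScan (some x) xs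
  | some p, x :: xs => if x ≤ p then false else pvColScan (some x) xs

theorem pvAdjLe_iff (r : List Int) : pvAdjLe r = true ↔ List.IsChain (· ≤ ·) r := by
  induction r with
  | nil => simp [pvAdjLe]
  | cons a t ih =>
    cases t with
    | nil => simp [pvAdjLe]
    | cons b u =>
      simp [pvAdjLe, List.isChain_cons_cons] at *
      intro _; exact ih

theorem pvSorted_eq_iff (r : List Int) :
    (PySem.List.sorted r (fun x => x) = r) ↔ List.IsChain (· ≤ ·) r := by
  constructor
  · intro h
    have := PySem.List.sorted_pairwise r (fun x => x)
    rw [h] at this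
    have this' : r.Pairwise (· ≤ ·) := by simpa using this
    exact List.isChain_iff_pairwise.mpr this'
  · intro h
    have hp : r.Pairwise (· ≤ ·) := List.isChain_iff_pairwise.mp h
    exact PySem.List.sorted_eq_self_of_pairwise r (fun x => x) (hp.imp (fun hab => hab))

theorem pvRowsOk_eq (t : List (List Int)) : pvRowsOk t = t.all pvAdjLe := by
  induction t with
  | nil => rfl
  | cons r rest ih =>
    simp only [pvRowsOk, List.all_cons, ← ih]
    by_cases h : PySem.List.sorted r (fun x => x) = r
    · have : pvAdjLe r = true := (pvAdjLe_iff r).mpr ((pvSorted_eq_iff r).mp h)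
      simp [h, this]
    · have hf : pvAdjLe r = false := by
        cases hb : pvAdjLe r
        · rfl
        · exact absurd ((pvSorted_eq_iff r).mpr ((pvAdjLe_iff r).mp hb)) h
      simp [h, hf]

-- length bound for foldl Set.add
theorem pvFoldlAdd_len_le (xs : List Int) : ∀ s : List Int,
    (xs.foldl PySem.Set.add s).length ≤ s.length + xs.length := by
  induction xs with
  | nil => intro s; simp
  | cons x xs ih =>
    intro s
    simp only [List.foldl_cons]
    have hlen : (PySem.Set.add s x).length ≤ s.length + 1 := by
      by_cases h : x ∈ s <;> simp [PySem.Set.add, List.contains_eq_mem, h]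
    have := ih (PySem.Set.add s x)
    simp only [List.length_cons]
    omega

theorem pvFoldlAdd_len_eq (xs : List Int) : ∀ s : List Int,
    (xs.foldl PySem.Set.add s).length = s.length + xs.length →
    xs.Nodup ∧ ∀ x ∈ xs, x ∉ s := by
  induction xs with
  | nil => intro s _; simp
  | cons x xs ih =>
    intro s h
    simp only [List.foldl_cons] at h
    by_cases hx : x ∈ s
    · exfalso
      have hadd : PySem.Set.add s x = s := by
        simp [PySem.Set.add, List.contains_eq_mem, hx]
      rw [hadd] at h
      have := pvFoldlAdd_len_le xs s
      simp [List.length_cons] at h; omega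
    · have hadd : PySem.Set.add s x = s ++ [x] := by
        simp [PySem.Set.add, List.contains_eq_mem, hx]
      rw [hadd] at h
      have h' : (xs.foldl PySem.Set.add (s ++ [x])).length = (s ++ [x]).length + xs.length := by
        simp at h ⊢; omega
      obtain ⟨hnd, hnotin⟩ := ih (s ++ [x]) h'
      refine ⟨List.nodup_cons.mpr ⟨fun hmem => ?_, hnd⟩, ?_⟩
      · have := hnotin x hmem; simp at this
      · intro y hy
        rcases List.mem_cons.mp hy with rfl | hy'
        · exact hx
        · intro hys; exact (hnotin y hy') (by simp [hys])

theorem pvOfList_len_eq_nodup (xs : List Int)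
    (h : (PySem.Set.ofList xs).length = xs.length) : xs.Nodup := by
  rw [PySem.Set.ofList_eq_foldl] at h
  exact (pvFoldlAdd_len_eq xs [] (by simpa using h)).1

theorem pvColCond_iff (col : List Int) :
    (PySem.List.sorted col (fun x => x) = col ∧
      (PySem.Set.ofList col).length = col.length) ↔ List.IsChain (· < ·) col := by
  constructor
  · rintro ⟨hs, hl⟩
    have hle := List.isChain_iff_pairwise.mp ((pvSorted_eq_iff col).mp hs)
    have hnd := pvOfList_len_eq_nodup col hl
    have : col.Pairwise (· < ·) := by
      have := List.Pairwise.and hle hnd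
      exact this.imp (fun h => lt_of_le_of_ne h.1 h.2)
    exact List.isChain_iff_pairwise.mpr this
  · intro h
    have hlt := List.isChain_iff_pairwise.mp h
    have hnd : col.Nodup := hlt.imp (by intro a b h; exact ne_of_lt h)
    refine ⟨(pvSorted_eq_iff col).mpr ?_, ?_⟩
    · exact (List.isChain_iff_pairwise.mpr (hlt.imp le_of_lt))
    · rw [PySem.Set.ofList_eq_self_of_nodup col hnd]

theorem pvColScan_iff : ∀ (col : List Int) (p : Int),
    pvColScan (some p) col = true ↔ List.IsChain (· < ·) (p :: col) := by
  intro col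
  induction col with
  | nil => intro p; simp [pvColScan]
  | cons x xs ih =>
    intro p
    by_cases h : x ≤ p
    · simp [pvColScan, h, List.isChain_cons_cons]
    · simp only [pvColScan, if_neg h, ih x, List.isChain_cons_cons]
      have hp : p < x := by omega
      tauto

theorem pvColScan_none_iff (col : List Int) :
    pvColScan none col = true ↔ List.IsChain (· < ·) col := by
  cases col with
  | nil => simp [pvColScan]
  | cons x xs => simpa [pvColScan] using pvColScan_iff xs x

theorem pvScan_eq : ∀ (t : List (List Int)) (prev : Option Int),
    pvScan prev t = (t.all pvAdjLe && pvColScan prev (t.filterMap List.head?)) := by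
  intro t
  induction t with
  | nil => intro prev; cases prev <;> simp [pvScan, pvColScan]
  | cons row rest ih =>
    intro prev
    by_cases hr : pvAdjLe row = true
    · cases row with
      | nil => simp [pvScan, hr, ih]
      | cons x xs =>
        cases prev with
        | none => simp [pvScan, hr, ih, pvColScan]
        | some p =>
          by_cases h : x ≤ p
          · simp [pvScan, hr, h, pvColScan]
          · simp [pvScan, hr, h, ih, pvColScan]
    · have hr' : pvAdjLe row = false := by
        cases hb : pvAdjLe row
        · rfl
        · exact absurd hb hr
      simp [pvScan, hr']

-- ===== VERDICT (by name: the statement is the Claim_ definition above) =====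
theorem is_sit_spec : Claim_equal_is_sit := by
  intro tableau _
  unfold Spec_is_sit is_sit is_sit_alt
  rw [pvScan_eq tableau none, pvRowsOk_eq]
  by_cases hrows : tableau.all pvAdjLe = true
  · rw [if_neg (by simp [hrows]), hrows]
    show (let col := tableau.filterMap List.head?; _) = _
    set col := tableau.filterMap List.head? with hcol
    by_cases hc : List.IsChain (· < ·) col
    · obtain ⟨h1, h2⟩ := (pvColCond_iff col).mpr hc
      rw [if_neg (by simp [h1, h2]), (pvColScan_none_iff col).mpr hc]
      rfl
    · have hsc : pvColScan none col = false := by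
        cases hb : pvColScan none col
        · rfl
        · exact absurd ((pvColScan_none_iff col).mp hb) hc
      have hnot : ¬ (PySem.List.sorted col (fun x => x) = col ∧
          (PySem.Set.ofList col).length = col.length) := fun hh => hc ((pvColCond_iff col).mp hh)
      rw [if_pos (by tauto), hsc]
      simp
  · have hrows' : tableau.all pvAdjLe = false := by
      cases hb : tableau.all pvAdjLe
      · rfl
      · exact absurd hb hrows
    rw [if_pos (by simp [hrows']), hrows']
    simp
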